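-- pv_equiv track=rewrite | github.com/harhar2000/mini_projects.py | count_robot_visitations.py | count_revisited_locations
-- ===== SOURCE A (Python) =====
-- def count_revisited_locations(directions):
--     x, y = 0, 0
--     visited = set()
--     revisited_locations = set()
--
--     visited.add((x, y))
--
--     for move in directions:
--         if move == 'N':
--             y += 1
--         elif move == 'S':
--             y -= 1
--         elif move == 'E':
--             x += 1
--         elif move == 'W':
--             x -= 1
--         else:
--             continue
--
--         if (x, y) in visited:
--             revisited_locations.add((x, y))
--         else:
--             visited.add((x, y))
--
--     return len(revisited_locations)
-- ===== SOURCE B (Python) =====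
-- def count_revisited_locations(directions):
--     # Build the full path of visited coordinates first, then tally
--     # frequencies in a second pass and count coordinates seen >= 2 times.
--     x, y = 0, 0
--     path = [(0, 0)]
--     for move in directions:
--         if move == 'N':
--             y += 1
--         elif move == 'S':
--             y -= 1
--         elif move == 'E':
--             x += 1
--         elif move == 'W':
--             x -= 1
--         else:
--             continue
--         path.append((x, y))
--     counts = {}
--     for p in path:
--         counts[p] = counts.get(p, 0) + 1
--     total = 0
--     for c in counts.values():
--         if c >= 2:
--             total += 1
--     return total
-- ===== Notes on version B (the rewrite author's own statement) =====
-- stated objective: alternative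
-- what changed: B first materialises the whole path of visited coordinates, then builds a frequency map over it in a second pass and counts the coordinates occurring at least twice, instead of maintaining visited/revisited sets simultaneously during the walk.
import Mathlib
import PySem

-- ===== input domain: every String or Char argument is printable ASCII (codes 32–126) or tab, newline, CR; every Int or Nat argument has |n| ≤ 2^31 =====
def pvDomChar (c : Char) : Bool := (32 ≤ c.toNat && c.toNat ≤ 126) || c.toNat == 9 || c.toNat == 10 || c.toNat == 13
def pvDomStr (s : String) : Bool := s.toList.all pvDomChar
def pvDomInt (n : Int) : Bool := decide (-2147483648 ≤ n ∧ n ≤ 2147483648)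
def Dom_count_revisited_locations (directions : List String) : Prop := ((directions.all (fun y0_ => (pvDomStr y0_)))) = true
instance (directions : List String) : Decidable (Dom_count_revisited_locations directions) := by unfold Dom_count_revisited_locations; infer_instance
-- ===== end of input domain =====

-- B builds the full path of visited coordinates first and then tallies frequencies,
-- counting coordinates occurring at least twice, instead of A's simultaneous
-- visited/revisited set maintenance (alternative decomposition, same cost).

-- ===== PORT A =====
-- 'if (x,y) in visited: revisited.add((x,y)) else: visited.add((x,y))'
def pvVisitA (q : Int × Int) (visited revisited : PySem.Set (Int × Int)) :
    (Int × Int) × PySem.Set (Int × Int) × PySem.Set (Int × Int) :=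
  if q ∈ visited then (q, visited, PySem.Set.add revisited q)
  else (q, PySem.Set.add visited q, revisited)

-- one iteration of A's loop; the final 'else: continue' leaves the state unchanged
def pvStepA (st : (Int × Int) × PySem.Set (Int × Int) × PySem.Set (Int × Int)) (move : String) :
    (Int × Int) × PySem.Set (Int × Int) × PySem.Set (Int × Int) :=
  if move = "N" then pvVisitA (st.1.1, st.1.2 + 1) st.2.1 st.2.2
  else if move = "S" then pvVisitA (st.1.1, st.1.2 - 1) st.2.1 st.2.2
  else if move = "E" then pvVisitA (st.1.1 + 1, st.1.2) st.2.1 st.2.2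
  else if move = "W" then pvVisitA (st.1.1 - 1, st.1.2) st.2.1 st.2.2
  else st

def count_revisited_locations (directions : List String) : Int :=
  PySem.List.len (directions.foldl pvStepA
    (((0 : Int), (0 : Int)), PySem.Set.add PySem.Set.empty ((0 : Int), (0 : Int)), PySem.Set.empty)).2.2

-- ===== PORT B =====
-- B's first loop: walk the moves, appending each new position to the path list.
def pvStepB (st : (Int × Int) × List (Int × Int)) (move : String) :
    (Int × Int) × List (Int × Int) :=
  if move = "N" then ((st.1.1, st.1.2 + 1), st.2 ++ [(st.1.1, st.1.2 + 1)])
  else if move = "S" then ((st.1.1, st.1.2 - 1), st.2 ++ [(st.1.1, st.1.2 - 1)])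
  else if move = "E" then ((st.1.1 + 1, st.1.2), st.2 ++ [(st.1.1 + 1, st.1.2)])
  else if move = "W" then ((st.1.1 - 1, st.1.2), st.2 ++ [(st.1.1 - 1, st.1.2)])
  else st

def count_revisited_locations_alt (directions : List String) : Int :=
  -- path loop; then counts[p] = counts.get(p, 0) + 1; then: if c >= 2: total += 1
  (((directions.foldl pvStepB (((0 : Int), (0 : Int)), [((0 : Int), (0 : Int))])).2.foldl
    (fun (d : PySem.Dict (Int × Int) Int) p => d.insert p (d.getD p 0 + 1))
    PySem.Dict.empty).values).foldl (fun total c => if 2 ≤ c then total + 1 else total) 0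

-- ===== PRECONDITION & SPEC =====
def Spec_count_revisited_locations (directions : List String) (out : Int) : Prop := out = count_revisited_locations_alt directions
instance (directions : List String) (out : Int) : Decidable (Spec_count_revisited_locations directions out) := by unfold Spec_count_revisited_locations; infer_instance

-- ===== CLAIM (what is proved, stated in full; the proofs are below) =====
def Claim_equal_count_revisited_locations : Prop := ∀ (directions : List String), Dom_count_revisited_locations directions → Spec_count_revisited_locations directions (count_revisited_locations directions)

-- ===== LEMMAS AND PROOFS =====

-- The list of positions produced by the valid moves of ms starting at (x, y).
def pvPath (x y : Int) : List String → List (Int × Int)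
  | [] => []
  | m :: ms =>
    if m = "N" then (x, y + 1) :: pvPath x (y + 1) ms
    else if m = "S" then (x, y - 1) :: pvPath x (y - 1) ms
    else if m = "E" then (x + 1, y) :: pvPath (x + 1) y ms
    else if m = "W" then (x - 1, y) :: pvPath (x - 1) y ms
    else pvPath x y ms

theorem pvStepB_path (ms : List String) : ∀ (x y : Int) (acc : List (Int × Int)),
    (ms.foldl pvStepB ((x, y), acc)).2 = acc ++ pvPath x y ms := by
  induction ms with
  | nil => intro x y acc; simp [pvPath]
  | cons m ms ih =>
    intro x y acc
    simp only [List.foldl_cons, pvStepB, pvPath]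
    split_ifs <;> simp [ih]

theorem pvVisitA_inv (q : Int × Int) (seen R : List (Int × Int))
    (hN : R.Nodup) (hR : ∀ p, p ∈ R ↔ 2 ≤ seen.count p) :
    pvVisitA q (PySem.Set.ofList seen) R =
      (q, PySem.Set.ofList (seen ++ [q]), (pvVisitA q (PySem.Set.ofList seen) R).2.2) ∧
    (pvVisitA q (PySem.Set.ofList seen) R).2.2.Nodup ∧
    (∀ p, p ∈ (pvVisitA q (PySem.Set.ofList seen) R).2.2 ↔ 2 ≤ (seen ++ [q]).count p) := by
  rw [PySem.Set.ofList_append_singleton]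
  unfold pvVisitA
  by_cases hq : q ∈ PySem.Set.ofList seen
  · have hqs : q ∈ seen := (PySem.Set.mem_ofList _ _).1 hq
    simp only [if_pos hq, PySem.Set.add_of_mem hq]
    refine ⟨trivial, PySem.Set.nodup_add _ _ hN, fun p => ?_⟩
    rw [PySem.Set.mem_add, hR p, List.count_append]
    by_cases hpq : p = q
    · subst hpq
      have : 0 < seen.count p := List.count_pos_iff.2 hqs
      have hc : List.count p [p] = 1 := by simp
      rw [hc]
      constructor
      · intro _; omega
      · intro _; right; rfl
    · have hc : List.count p [q] = 0 := by
        rw [List.count_eq_zero]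
        simp [hpq]
      rw [hc]
      simp [hpq]
  · have hqs : q ∉ seen := fun h => hq ((PySem.Set.mem_ofList _ _).2 h)
    simp only [if_neg hq]
    refine ⟨trivial, hN, fun p => ?_⟩
    rw [hR p, List.count_append]
    by_cases hpq : p = q
    · subst hpq
      have h0 : seen.count p = 0 := List.count_eq_zero.2 hqs
      have hc : List.count p [p] = 1 := by simp
      rw [h0, hc]
      omega
    · have hc : List.count p [q] = 0 := by
        rw [List.count_eq_zero]
        simp [hpq]
      rw [hc]
      omega

theorem pvStepA_inv (ms : List String) : ∀ (x y : Int) (seen R : List (Int × Int)),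
    R.Nodup → (∀ p, p ∈ R ↔ 2 ≤ seen.count p) →
    (ms.foldl pvStepA ((x, y), PySem.Set.ofList seen, R)).2.2.Nodup ∧
    (∀ p, p ∈ (ms.foldl pvStepA ((x, y), PySem.Set.ofList seen, R)).2.2 ↔
      2 ≤ (seen ++ pvPath x y ms).count p) := by
  induction ms with
  | nil =>
    intro x y seen R hN hR
    simp only [List.foldl_nil, pvPath, List.append_nil]
    exact ⟨hN, hR⟩
  | cons m ms ih =>
    intro x y seen R hN hR
    simp only [List.foldl_cons, pvStepA, pvPath]
    split_ifs with h1 h2 h3 h4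
    · obtain ⟨he, hn, hm⟩ := pvVisitA_inv (x, y + 1) seen R hN hR
      rw [he]
      simpa [List.append_assoc] using ih x (y + 1) (seen ++ [(x, y + 1)]) _ hn hm
    · obtain ⟨he, hn, hm⟩ := pvVisitA_inv (x, y - 1) seen R hN hR
      rw [he]
      simpa [List.append_assoc] using ih x (y - 1) (seen ++ [(x, y - 1)]) _ hn hm
    · obtain ⟨he, hn, hm⟩ := pvVisitA_inv (x + 1, y) seen R hN hR
      rw [he]
      simpa [List.append_assoc] using ih (x + 1) y (seen ++ [(x + 1, y)]) _ hn hm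
    · obtain ⟨he, hn, hm⟩ := pvVisitA_inv (x - 1, y) seen R hN hR
      rw [he]
      simpa [List.append_assoc] using ih (x - 1) y (seen ++ [(x - 1, y)]) _ hn hm
    · exact ih x y seen R hN hR

-- the sum loop over values counts the entries ≥ 2
theorem pvB_closed (ms : List String) :
    count_revisited_locations_alt ms =
      (((PySem.Set.ofList ((0, 0) :: pvPath 0 0 ms)).filter
        (fun k => decide (2 ≤ (((0, 0) :: pvPath 0 0 ms).count k : Int)))).length : Int) := by
  unfold count_revisited_locations_alt
  rw [pvStepB_path]
  rw [PySem.Dict.foldl_insert_getD_add_one_eq_counter]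
  rw [show PySem.Dict.values = fun (d : PySem.Dict (Int × Int) Int) => d.items.map (·.2) from rfl]
  simp only [PySem.Dict.items_counter]
  rw [PySem.List.foldl_ite_add_one]
  simp only [zero_add, Nat.cast_inj]
  rw [← List.countP_eq_length_filter, List.map_map, List.countP_map]
  rfl

-- ===== VERDICT (by name: the statement is the Claim_ definition above) =====
theorem count_revisited_locations_spec : Claim_equal_count_revisited_locations := by
  unfold Claim_equal_count_revisited_locations
  intro ms _
  unfold Spec_count_revisited_locations
  rw [pvB_closed]
  unfold count_revisited_locations
  have hinit : (PySem.Set.add PySem.Set.empty ((0 : Int), (0 : Int))) =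
      PySem.Set.ofList [((0 : Int), (0 : Int))] := by decide
  rw [hinit]
  obtain ⟨hn, hm⟩ := pvStepA_inv ms 0 0 [((0 : Int), (0 : Int))] PySem.Set.empty (by simp)
    (by
      intro p
      have : List.count p [((0 : Int), (0 : Int))] ≤ 1 := by
        calc List.count p [((0 : Int), (0 : Int))] ≤ [((0 : Int), (0 : Int))].length :=
              List.count_le_length
          _ = 1 := by simp
      simp only [PySem.Set.empty, List.not_mem_nil, false_iff]
      omega)
  have hperm : ((ms.foldl pvStepA (((0 : Int), (0 : Int)),
        PySem.Set.ofList [((0 : Int), (0 : Int))], PySem.Set.empty)).2.2).Perm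
      ((PySem.Set.ofList ((0, 0) :: pvPath 0 0 ms)).filter
        (fun k => decide (2 ≤ (((0, 0) :: pvPath 0 0 ms).count k : Int)))) := by
    rw [List.perm_ext_iff_of_nodup hn ((PySem.Set.nodup_ofList _).filter _)]
    intro p
    rw [List.mem_filter, PySem.Set.mem_ofList]
    constructor
    · intro hp
      have h2 := (hm p).1 hp
      simp only [List.singleton_append] at h2
      have hmem : p ∈ (0, 0) :: pvPath 0 0 ms := by
        by_contra hc
        rw [List.count_eq_zero.2 hc] at h2
        omega
      exact ⟨hmem, by simp; omega⟩
    · rintro ⟨hmem, hcnt⟩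
      apply (hm p).2
      simp only [List.singleton_append]
      simp at hcnt
      omega
  rw [PySem.List.len_eq, hperm.length_eq]
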